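-- pv_equiv track=rewrite | github.com/llltttwww/trl-for-rec | rec_utils/rec_grpo_reward.py | _normalize_ranking_1_to_0_based
-- ===== SOURCE A (Python) =====
-- from typing import List, Dict, Optional
--
-- def _normalize_ranking_1_to_0_based(
--     ranking_1_based: List[int],
--     K: int,
-- ) -> Optional[List[int]]:
--     """
--     把 [1..K] 的排序转换成 [0..K-1]，并校验是否是一个合法排列。
--     """
--     ranking_0 = [x - 1 for x in ranking_1_based]
--     if len(ranking_0) < K:
--         return None
--     ranking_0 = ranking_0[:K]
--
--     if sorted(ranking_0) != list(range(K)):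
--         # 不是 0..K-1 的一个排列，认为无效
--         return None
--     return ranking_0
-- ===== SOURCE B (Python) =====
-- def _normalize_ranking_1_to_0_based(ranking_1_based, K):
--     if len(ranking_1_based) < K:
--         return None
--     ranking_0 = [x - 1 for x in ranking_1_based[:K]]
--     seen = set()
--     for v in ranking_0:
--         if v < 0 or v >= K or v in seen:
--             return None
--         seen.add(v)
--     return ranking_0
-- ===== Notes on version B (the rewrite author's own statement) =====
-- stated objective: faster
-- what changed: Replaces A's sort-then-compare-with-range(K) permutation test by a single left-to-right pass that checks each truncated value is in [0,K) and unseen via a seen-set (no sort, no range list), returning None on the first violation.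
import Mathlib
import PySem

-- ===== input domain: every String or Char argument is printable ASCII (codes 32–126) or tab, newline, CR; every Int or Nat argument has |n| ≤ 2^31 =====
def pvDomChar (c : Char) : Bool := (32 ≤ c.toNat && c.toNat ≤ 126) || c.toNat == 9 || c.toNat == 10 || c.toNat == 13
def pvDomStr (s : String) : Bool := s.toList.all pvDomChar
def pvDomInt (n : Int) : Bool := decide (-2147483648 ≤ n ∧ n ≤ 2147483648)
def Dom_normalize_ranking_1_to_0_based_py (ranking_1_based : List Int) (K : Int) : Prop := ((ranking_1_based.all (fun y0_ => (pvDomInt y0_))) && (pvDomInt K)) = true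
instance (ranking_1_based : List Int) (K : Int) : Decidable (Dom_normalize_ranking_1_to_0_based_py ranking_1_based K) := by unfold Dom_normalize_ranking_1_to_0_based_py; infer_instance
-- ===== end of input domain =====

-- B replaces A's sort-and-compare permutation test by a single-pass range+duplicate check with a seen-set (simpler, no sort).

-- ===== PORT A =====
def normalize_ranking_1_to_0_based_py (ranking_1_based : List Int) (K : Int) : Option (List Int) :=
  let ranking_0 := ranking_1_based.map (fun x => x - 1)
  if (ranking_0.length : Int) < K then none
  else
    let ranking_0 := PySem.List.slice ranking_0 none (some K)
    if PySem.List.sorted ranking_0 (fun x => x) false ≠ PySem.List.pyRange 0 K 1 then none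
    else some ranking_0

-- ===== PORT B =====
-- the for-loop of Source B: returns false iff some element is out of [0,K) or already seen
def nrLoop (K : Int) (seen : PySem.Set Int) : List Int → Bool
  | [] => true
  | v :: vs =>
      if v < 0 || K ≤ v || PySem.Set.contains seen v then false
      else nrLoop K (PySem.Set.add seen v) vs

def normalize_ranking_1_to_0_based_py_alt (ranking_1_based : List Int) (K : Int) : Option (List Int) :=
  if (ranking_1_based.length : Int) < K then none
  else
    let ranking_0 := (PySem.List.slice ranking_1_based none (some K)).map (fun x => x - 1)
    if nrLoop K PySem.Set.empty ranking_0 then some ranking_0 else none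

-- ===== PRECONDITION & SPEC =====
def Spec_normalize_ranking_1_to_0_based_py (ranking_1_based : List Int) (K : Int) (out : Option (List Int)) : Prop := out = normalize_ranking_1_to_0_based_py_alt ranking_1_based K
instance (ranking_1_based : List Int) (K : Int) (out : Option (List Int)) : Decidable (Spec_normalize_ranking_1_to_0_based_py ranking_1_based K out) := by unfold Spec_normalize_ranking_1_to_0_based_py; infer_instance

-- ===== CLAIM (what is proved, stated in full; the proofs are below) =====
def Claim_equal_normalize_ranking_1_to_0_based_py : Prop := ∀ (ranking_1_based : List Int) (K : Int), Dom_normalize_ranking_1_to_0_based_py ranking_1_based K → Spec_normalize_ranking_1_to_0_based_py ranking_1_based K (normalize_ranking_1_to_0_based_py ranking_1_based K)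

-- ===== LEMMAS AND PROOFS =====

-- slicing commutes with mapping
theorem pv_slice_map (f : Int → Int) (xs : List Int) (K : Int) :
    PySem.List.slice (xs.map f) none (some K) = (PySem.List.slice xs none (some K)).map f := by
  simp [PySem.List.slice, PySem.List.clampIdx]

-- the loop accepts iff all elements are fresh and in [0,K) and the list has no duplicates
theorem nrLoop_spec (K : Int) (l : List Int) : ∀ (seen : PySem.Set Int),
    (nrLoop K seen l = true ↔ (∀ v ∈ l, 0 ≤ v ∧ v < K ∧ v ∉ seen) ∧ l.Nodup) := by
  induction l with
  | nil => intro seen; simp [nrLoop]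
  | cons v vs ih =>
      intro seen
      simp only [nrLoop]
      by_cases hbad : v < 0 ∨ K ≤ v ∨ PySem.Set.contains seen v
      · have : (v < 0 || K ≤ v || PySem.Set.contains seen v) = true := by
          rcases hbad with h | h | h
          · simp [h]
          · simp [h]
          · simp only [Bool.or_eq_true]
            exact Or.inr h
        rw [this]
        simp only [if_true]
        constructor
        · intro h; cases h
        · rintro ⟨hall, _⟩
          rcases hall v (by simp) with ⟨h1, h2, h3⟩
          rcases hbad with h | h | h
          · omega
          · omega
          · exact absurd (List.mem_of_elem_eq_true h) h3
      · push Not at hbad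
        obtain ⟨h1, h2, h3⟩ := hbad
        have hvn : v ∉ seen := fun hm => h3 (List.elem_eq_true_of_mem hm)
        have : (v < 0 || K ≤ v || PySem.Set.contains seen v) = false := by
          simp only [Bool.or_eq_false_iff]
          exact ⟨⟨by simp [not_lt.mpr h1], by simp [not_le.mpr h2]⟩,
            Bool.not_eq_true _ ▸ h3⟩
        rw [this]
        simp only [Bool.false_eq_true, if_false]
        rw [ih (PySem.Set.add seen v)]
        constructor
        · rintro ⟨hall, hnd⟩
          constructor
          · intro w hw
            rcases List.mem_cons.mp hw with hw | hw
            · subst hw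
              exact ⟨h1, h2, hvn⟩
            · rcases hall w hw with ⟨g1, g2, g3⟩
              refine ⟨g1, g2, fun hm => g3 ?_⟩
              simp [PySem.Set.mem_add, hm]
          · refine List.nodup_cons.mpr ⟨?_, hnd⟩
            intro hv
            rcases hall v hv with ⟨_, _, g3⟩
            exact g3 (by simp [PySem.Set.mem_add])
        · rintro ⟨hall, hnd⟩
          obtain ⟨hvnmem, hnd'⟩ := List.nodup_cons.mp hnd
          refine ⟨?_, hnd'⟩
          intro w hw
          rcases hall w (List.mem_cons_of_mem _ hw) with ⟨g1, g2, g3⟩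
          refine ⟨g1, g2, fun hm => ?_⟩
          rcases (PySem.Set.mem_add seen v w).mp hm with hm' | hm'
          · exact g3 hm'
          · subst hm'
            exact hvnmem hw
  
-- sort-and-compare equals the single-pass check (whenever the length fits)
theorem pv_key (K : Int) (l : List Int) (hlen : K ≤ 0 ∨ (l.length : Int) = K) :
    (PySem.List.sorted l (fun x => x) false = PySem.List.pyRange 0 K 1) ↔
      nrLoop K PySem.Set.empty l = true := by
  rw [nrLoop_spec]
  rcases hlen with hK | hK
  · rw [PySem.List.pyRange_one_eq_nil (by omega)]
    constructor
    · intro h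
      have hperm := PySem.List.sorted_perm l (fun x => x) false
      rw [h] at hperm
      have hnil : l = [] := List.perm_nil.mp hperm.symm ▸ rfl
      subst hnil
      simp
    · rintro ⟨hall, _⟩
      cases l with
      | nil => simp [PySem.List.sorted]
      | cons v vs =>
          rcases hall v (by simp) with ⟨g1, g2, _⟩
          omega
  · constructor
    · intro h
      have hperm : l.Perm (PySem.List.pyRange 0 K 1) := by
        have hp := PySem.List.sorted_perm l (fun x => x) false
        rw [h] at hp
        exact hp.symm
      refine ⟨?_, hperm.nodup_iff.mpr (PySem.List.nodup_pyRange_one 0 K)⟩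
      intro v hv
      have : v ∈ PySem.List.pyRange 0 K 1 := hperm.mem_iff.mp hv
      rcases (PySem.List.mem_pyRange_one).mp this with ⟨g1, g2⟩
      exact ⟨g1, g2, by simp [PySem.Set.empty]⟩
    · rintro ⟨hall, hnd⟩
      have hsub : l ⊆ PySem.List.pyRange 0 K 1 := by
        intro v hv
        rcases hall v hv with ⟨g1, g2, _⟩
        exact (PySem.List.mem_pyRange_one).mpr ⟨g1, g2⟩
      have hsp : l.Subperm (PySem.List.pyRange 0 K 1) := List.subperm_of_subset hnd hsub
      have hlength : (PySem.List.pyRange 0 K 1).length ≤ l.length := by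
        rw [PySem.List.length_pyRange_one]
        omega
      have hperm : l.Perm (PySem.List.pyRange 0 K 1) := hsp.perm_of_length_le hlength
      exact PySem.List.sorted_eq_of_perm_of_pairwise_lt l (PySem.List.pyRange 0 K 1)
        (fun x => x) hperm.symm (PySem.List.pairwise_lt_pyRange_one 0 K)

-- ===== VERDICT (by name: the statement is the Claim_ definition above) =====
theorem normalize_ranking_1_to_0_based_py_spec : Claim_equal_normalize_ranking_1_to_0_based_py := by
  intro r K _
  unfold Spec_normalize_ranking_1_to_0_based_py
  unfold normalize_ranking_1_to_0_based_py normalize_ranking_1_to_0_based_py_alt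
  simp only [List.length_map, pv_slice_map]
  by_cases hlt : (r.length : Int) < K
  · simp [hlt]
  · simp only [hlt, if_false]
    set l := (PySem.List.slice r none (some K)).map (fun x => x - 1) with hl
    have hlen : K ≤ 0 ∨ (l.length : Int) = K := by
      by_cases hK : K ≤ 0
      · exact Or.inl hK
      · right
        rw [hl]
        rw [List.length_map, PySem.List.slice_to r (by omega : (0:Int) ≤ K)]
        rw [List.length_take]
        omega
    have hk := pv_key K l hlen
    simp only [PySem.Set.empty] at hk
    rcases hk with ⟨h1, h2⟩
    by_cases hs : PySem.List.sorted l (fun x => x) false = PySem.List.pyRange 0 K 1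
    · simp [hs, h1 hs]
    · have hfl : nrLoop K ([] : List Int) l = false := by
        cases hb : nrLoop K ([] : List Int) l
        · rfl
        · exact absurd (h2 hb) hs
      simp [hs, hfl]
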